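-- pv_equiv track=rewrite | github.com/liuyang19900520/stock-rookie | main.py | _suggest_template_for_industry
-- ===== SOURCE A (Python) =====
-- def _suggest_template_for_industry(industry: str) -> str:
--     """为新行业建议合适的模板"""
--     industry_lower = industry.lower()
--
--     # 金融相关
--     if any(keyword in industry_lower for keyword in ['bank', 'financial', 'credit', 'insurance', 'asset', 'investment', 'capital', 'mortgage']):
--         if 'insurance' in industry_lower:
--             return 'insurance'
--         return 'banking'
--
--     # 科技相关
--     if any(keyword in industry_lower for keyword in ['software', 'technology', 'semiconductor', 'internet', 'electronic', 'gaming', 'communication']):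
--         return 'technology'
--
--     # 医疗相关
--     if any(keyword in industry_lower for keyword in ['drug', 'medical', 'biotechnology', 'healthcare', 'pharmaceutical']):
--         return 'healthcare'
--
--     # 能源相关
--     if any(keyword in industry_lower for keyword in ['oil', 'gas', 'energy', 'coal', 'renewable', 'petroleum']):
--         return 'energy'
--
--     # 消费品相关
--     if any(keyword in industry_lower for keyword in ['beverage', 'food', 'packaged', 'household', 'personal', 'textile', 'apparel', 'footwear']):
--         return 'consumer_goods'
--
--     # 零售相关
--     if any(keyword in industry_lower for keyword in ['retail', 'store', 'dealership', 'grocery', 'discount', 'department']):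
--         return 'retail'
--
--     # 工业相关
--     if any(keyword in industry_lower for keyword in ['aerospace', 'defense', 'industrial', 'machinery', 'metal', 'electrical', 'building']):
--         return 'industrial'
--
--     # 房地产相关
--     if any(keyword in industry_lower for keyword in ['reit', 'real estate', 'property', 'development']):
--         return 'real_estate'
--
--     # 通信相关
--     if any(keyword in industry_lower for keyword in ['telecom', 'entertainment', 'broadcasting', 'publishing', 'media']):
--         return 'telecommunications'
--
--     # 材料相关
--     if any(keyword in industry_lower for keyword in ['chemical', 'steel', 'aluminum', 'copper', 'gold', 'silver', 'agricultural']):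
--         return 'materials'
--
--     # 公用事业相关
--     if any(keyword in industry_lower for keyword in ['utility', 'electric', 'gas', 'water', 'power']):
--         return 'utilities'
--
--     # 运输相关
--     if any(keyword in industry_lower for keyword in ['airline', 'railroad', 'trucking', 'shipping', 'transportation', 'airport']):
--         return 'transportation'
--
--     # 默认使用通用模板
--     return 'general'
-- ===== SOURCE B (Python) =====
-- # Flat prioritized keyword list; precedence is numeric, not control-flow order.
-- _KEYWORDS = [
--     ("insurance", 0, "insurance"),
--     ("bank", 1, "banking"), ("financial", 1, "banking"), ("credit", 1, "banking"),
--     ("asset", 1, "banking"), ("investment", 1, "banking"), ("capital", 1, "banking"),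
--     ("mortgage", 1, "banking"),
--     ("software", 2, "technology"), ("technology", 2, "technology"), ("semiconductor", 2, "technology"),
--     ("internet", 2, "technology"), ("electronic", 2, "technology"), ("gaming", 2, "technology"),
--     ("communication", 2, "technology"),
--     ("drug", 3, "healthcare"), ("medical", 3, "healthcare"), ("biotechnology", 3, "healthcare"),
--     ("healthcare", 3, "healthcare"), ("pharmaceutical", 3, "healthcare"),
--     ("oil", 4, "energy"), ("gas", 4, "energy"), ("energy", 4, "energy"), ("coal", 4, "energy"),
--     ("renewable", 4, "energy"), ("petroleum", 4, "energy"),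
--     ("beverage", 5, "consumer_goods"), ("food", 5, "consumer_goods"), ("packaged", 5, "consumer_goods"),
--     ("household", 5, "consumer_goods"), ("personal", 5, "consumer_goods"), ("textile", 5, "consumer_goods"),
--     ("apparel", 5, "consumer_goods"), ("footwear", 5, "consumer_goods"),
--     ("retail", 6, "retail"), ("store", 6, "retail"), ("dealership", 6, "retail"),
--     ("grocery", 6, "retail"), ("discount", 6, "retail"), ("department", 6, "retail"),
--     ("aerospace", 7, "industrial"), ("defense", 7, "industrial"), ("industrial", 7, "industrial"),
--     ("machinery", 7, "industrial"), ("metal", 7, "industrial"), ("electrical", 7, "industrial"),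
--     ("building", 7, "industrial"),
--     ("reit", 8, "real_estate"), ("real estate", 8, "real_estate"), ("property", 8, "real_estate"),
--     ("development", 8, "real_estate"),
--     ("telecom", 9, "telecommunications"), ("entertainment", 9, "telecommunications"),
--     ("broadcasting", 9, "telecommunications"), ("publishing", 9, "telecommunications"),
--     ("media", 9, "telecommunications"),
--     ("chemical", 10, "materials"), ("steel", 10, "materials"), ("aluminum", 10, "materials"),
--     ("copper", 10, "materials"), ("gold", 10, "materials"), ("silver", 10, "materials"),
--     ("agricultural", 10, "materials"),
--     ("utility", 11, "utilities"), ("electric", 11, "utilities"), ("gas", 11, "utilities"),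
--     ("water", 11, "utilities"), ("power", 11, "utilities"),
--     ("airline", 12, "transportation"), ("railroad", 12, "transportation"), ("trucking", 12, "transportation"),
--     ("shipping", 12, "transportation"), ("transportation", 12, "transportation"), ("airport", 12, "transportation"),
-- ]
--
-- def _suggest_template_for_industry(industry: str) -> str:
--     """Min-priority reduction over all matching keywords (no early return)."""
--     low = industry.lower()
--     best = None
--     for kw, prio, tpl in _KEYWORDS:
--         if kw in low and (best is None or prio < best[0]):
--             best = (prio, tpl)
--     return best[1] if best is not None else 'general'
-- ===== Notes on version B (the rewrite author's own statement) =====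
-- stated objective: alternative
-- what changed: Replaces the ordered if/any cascade (first-match control flow) with a single min-reduction over one flat prioritized keyword list: every keyword is checked, precedence is a numeric priority resolved by a running minimum rather than branch order (a keyword listed in two blocks is resolved by min instead of statement order).
import Mathlib
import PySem

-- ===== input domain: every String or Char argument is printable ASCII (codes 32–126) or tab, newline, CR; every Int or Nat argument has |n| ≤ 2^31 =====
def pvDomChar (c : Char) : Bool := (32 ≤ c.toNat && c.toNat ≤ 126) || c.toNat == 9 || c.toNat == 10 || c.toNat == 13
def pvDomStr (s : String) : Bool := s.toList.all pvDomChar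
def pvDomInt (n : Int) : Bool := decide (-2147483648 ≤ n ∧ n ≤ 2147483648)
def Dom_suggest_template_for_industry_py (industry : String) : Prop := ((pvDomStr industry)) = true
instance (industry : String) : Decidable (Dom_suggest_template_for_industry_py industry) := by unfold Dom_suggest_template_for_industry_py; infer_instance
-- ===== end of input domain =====

-- B replaces A's ordered if/any cascade by a single min-priority reduction over a flat
-- prioritized keyword list (no early return; precedence is numeric, resolved by a running minimum).

-- ===== PORT A =====
-- literal transliteration of A: lowercase once, then the if/any cascade in source order
def suggest_template_for_industry_py (industry : String) : String :=
  let l := PySem.Str.lower industry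
  if (["bank", "financial", "credit", "insurance", "asset", "investment", "capital", "mortgage"].any (fun k => PySem.Str.isIn k l)) then
    if PySem.Str.isIn "insurance" l then "insurance" else "banking"
  else if (["software", "technology", "semiconductor", "internet", "electronic", "gaming", "communication"].any (fun k => PySem.Str.isIn k l)) then
    "technology"
  else if (["drug", "medical", "biotechnology", "healthcare", "pharmaceutical"].any (fun k => PySem.Str.isIn k l)) then
    "healthcare"
  else if (["oil", "gas", "energy", "coal", "renewable", "petroleum"].any (fun k => PySem.Str.isIn k l)) then
    "energy"
  else if (["beverage", "food", "packaged", "household", "personal", "textile", "apparel", "footwear"].any (fun k => PySem.Str.isIn k l)) then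
    "consumer_goods"
  else if (["retail", "store", "dealership", "grocery", "discount", "department"].any (fun k => PySem.Str.isIn k l)) then
    "retail"
  else if (["aerospace", "defense", "industrial", "machinery", "metal", "electrical", "building"].any (fun k => PySem.Str.isIn k l)) then
    "industrial"
  else if (["reit", "real estate", "property", "development"].any (fun k => PySem.Str.isIn k l)) then
    "real_estate"
  else if (["telecom", "entertainment", "broadcasting", "publishing", "media"].any (fun k => PySem.Str.isIn k l)) then
    "telecommunications"
  else if (["chemical", "steel", "aluminum", "copper", "gold", "silver", "agricultural"].any (fun k => PySem.Str.isIn k l)) then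
    "materials"
  else if (["utility", "electric", "gas", "water", "power"].any (fun k => PySem.Str.isIn k l)) then
    "utilities"
  else if (["airline", "railroad", "trucking", "shipping", "transportation", "airport"].any (fun k => PySem.Str.isIn k l)) then
    "transportation"
  else "general"

-- ===== PORT B =====
-- the flat prioritized keyword list of Source B
def pvKeywords : List (String × Int × String) :=
  [ ("insurance", 0, "insurance"),
    ("bank", 1, "banking"), ("financial", 1, "banking"), ("credit", 1, "banking"),
    ("asset", 1, "banking"), ("investment", 1, "banking"), ("capital", 1, "banking"),
    ("mortgage", 1, "banking"),
    ("software", 2, "technology"), ("technology", 2, "technology"), ("semiconductor", 2, "technology"),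
    ("internet", 2, "technology"), ("electronic", 2, "technology"), ("gaming", 2, "technology"),
    ("communication", 2, "technology"),
    ("drug", 3, "healthcare"), ("medical", 3, "healthcare"), ("biotechnology", 3, "healthcare"),
    ("healthcare", 3, "healthcare"), ("pharmaceutical", 3, "healthcare"),
    ("oil", 4, "energy"), ("gas", 4, "energy"), ("energy", 4, "energy"), ("coal", 4, "energy"),
    ("renewable", 4, "energy"), ("petroleum", 4, "energy"),
    ("beverage", 5, "consumer_goods"), ("food", 5, "consumer_goods"), ("packaged", 5, "consumer_goods"),
    ("household", 5, "consumer_goods"), ("personal", 5, "consumer_goods"), ("textile", 5, "consumer_goods"),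
    ("apparel", 5, "consumer_goods"), ("footwear", 5, "consumer_goods"),
    ("retail", 6, "retail"), ("store", 6, "retail"), ("dealership", 6, "retail"),
    ("grocery", 6, "retail"), ("discount", 6, "retail"), ("department", 6, "retail"),
    ("aerospace", 7, "industrial"), ("defense", 7, "industrial"), ("industrial", 7, "industrial"),
    ("machinery", 7, "industrial"), ("metal", 7, "industrial"), ("electrical", 7, "industrial"),
    ("building", 7, "industrial"),
    ("reit", 8, "real_estate"), ("real estate", 8, "real_estate"), ("property", 8, "real_estate"),
    ("development", 8, "real_estate"),
    ("telecom", 9, "telecommunications"), ("entertainment", 9, "telecommunications"),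
    ("broadcasting", 9, "telecommunications"), ("publishing", 9, "telecommunications"),
    ("media", 9, "telecommunications"),
    ("chemical", 10, "materials"), ("steel", 10, "materials"), ("aluminum", 10, "materials"),
    ("copper", 10, "materials"), ("gold", 10, "materials"), ("silver", 10, "materials"),
    ("agricultural", 10, "materials"),
    ("utility", 11, "utilities"), ("electric", 11, "utilities"), ("gas", 11, "utilities"),
    ("water", 11, "utilities"), ("power", 11, "utilities"),
    ("airline", 12, "transportation"), ("railroad", 12, "transportation"), ("trucking", 12, "transportation"),
    ("shipping", 12, "transportation"), ("transportation", 12, "transportation"), ("airport", 12, "transportation") ]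

-- Source B's loop: keep the matching entry of minimal priority (no early return)
def pvBestFold (low : String) : List (String × Int × String) → Option (Int × String) → Option (Int × String)
  | [], best => best
  | (kw, prio, tpl) :: rest, best =>
      pvBestFold low rest
        (if PySem.Str.isIn kw low &&
            (match best with | none => true | some (p, _) => decide (prio < p))
         then some (prio, tpl) else best)

-- "best[1] if best is not None else 'general'"
def pvOut : Option (Int × String) → String
  | some (_, t) => t
  | none => "general"

def suggest_template_for_industry_py_alt (industry : String) : String :=
  pvOut (pvBestFold (PySem.Str.lower industry) pvKeywords none)

-- ===== PRECONDITION & SPEC =====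
def Spec_suggest_template_for_industry_py (industry : String) (out : String) : Prop := out = suggest_template_for_industry_py_alt industry
instance (industry : String) (out : String) : Decidable (Spec_suggest_template_for_industry_py industry out) := by unfold Spec_suggest_template_for_industry_py; infer_instance

-- ===== CLAIM =====
def Claim_equal_suggest_template_for_industry_py : Prop := ∀ (industry : String), Dom_suggest_template_for_industry_py industry → Spec_suggest_template_for_industry_py industry (suggest_template_for_industry_py industry)

-- ===== LEMMAS AND PROOFS =====

-- first match over a prioritized list (proof-side characterisation of the fold on sorted lists)
def pvFirst (low : String) : List (String × Int × String) → Option (Int × String)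
  | [] => none
  | (kw, p, t) :: rest => if PySem.Str.isIn kw low then some (p, t) else pvFirst low rest

-- once best is set at priority p, entries with priority ≥ p never replace it
theorem pvBestFold_some (low : String) (l : List (String × Int × String)) (p : Int) (t : String)
    (h : ∀ x ∈ l, p ≤ x.2.1) : pvBestFold low l (some (p, t)) = some (p, t) := by
  induction l with
  | nil => rfl
  | cons x rest ih =>
    obtain ⟨kw, prio, tpl⟩ := x
    have hp : p ≤ prio := h _ (List.mem_cons_self ..)
    simp only [pvBestFold]
    have : decide (prio < p) = false := by simp; omega
    rw [if_neg (by simp [this])]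
    exact ih (fun x hx => h x (List.mem_cons_of_mem _ hx))

-- on a list sorted (nondecreasing) by priority, the min-fold is the first match
theorem pvBestFold_eq_first (low : String) (l : List (String × Int × String))
    (h : l.Pairwise (fun a b => a.2.1 ≤ b.2.1)) :
    pvBestFold low l none = pvFirst low l := by
  induction l with
  | nil => rfl
  | cons x rest ih =>
    obtain ⟨kw, prio, tpl⟩ := x
    rw [List.pairwise_cons] at h
    simp only [pvBestFold, pvFirst]
    cases hm : PySem.Str.isIn kw low with
    | false => simpa using ih h.2
    | true =>
      simp only [Bool.true_and, if_true]
      exact pvBestFold_some low rest prio tpl (fun x hx => h.1 x hx)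

-- a block of keywords sharing one (priority, template): first match = any
theorem pvFirst_block (low : String) (kws : List String) (p : Int) (t : String)
    (rest : List (String × Int × String)) :
    pvFirst low (kws.map (fun k => (k, p, t)) ++ rest) =
      if kws.any (fun k => PySem.Str.isIn k low) then some (p, t) else pvFirst low rest := by
  induction kws with
  | nil => simp
  | cons k ks ih =>
    simp only [List.map_cons, List.cons_append, pvFirst, List.any_cons, ih, Bool.or_eq_true]
    by_cases hm : PySem.Str.isIn k low = true
    · rw [if_pos hm, if_pos (Or.inl hm)]
    · rw [if_neg hm]
      by_cases h2 : (ks.any fun k => PySem.Str.isIn k low) = true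
      · rw [if_pos h2, if_pos (Or.inr h2)]
      · rw [if_neg h2, if_neg (by tauto)]

-- the flat table is exactly the thirteen blocks concatenated
theorem pvKeywords_blocks : pvKeywords =
    (["insurance"].map (fun k => (k, (0:Int), "insurance"))) ++
    (["bank", "financial", "credit", "asset", "investment", "capital", "mortgage"].map (fun k => (k, (1:Int), "banking"))) ++
    (["software", "technology", "semiconductor", "internet", "electronic", "gaming", "communication"].map (fun k => (k, (2:Int), "technology"))) ++
    (["drug", "medical", "biotechnology", "healthcare", "pharmaceutical"].map (fun k => (k, (3:Int), "healthcare"))) ++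
    (["oil", "gas", "energy", "coal", "renewable", "petroleum"].map (fun k => (k, (4:Int), "energy"))) ++
    (["beverage", "food", "packaged", "household", "personal", "textile", "apparel", "footwear"].map (fun k => (k, (5:Int), "consumer_goods"))) ++
    (["retail", "store", "dealership", "grocery", "discount", "department"].map (fun k => (k, (6:Int), "retail"))) ++
    (["aerospace", "defense", "industrial", "machinery", "metal", "electrical", "building"].map (fun k => (k, (7:Int), "industrial"))) ++
    (["reit", "real estate", "property", "development"].map (fun k => (k, (8:Int), "real_estate"))) ++
    (["telecom", "entertainment", "broadcasting", "publishing", "media"].map (fun k => (k, (9:Int), "telecommunications"))) ++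
    (["chemical", "steel", "aluminum", "copper", "gold", "silver", "agricultural"].map (fun k => (k, (10:Int), "materials"))) ++
    (["utility", "electric", "gas", "water", "power"].map (fun k => (k, (11:Int), "utilities"))) ++
    (["airline", "railroad", "trucking", "shipping", "transportation", "airport"].map (fun k => (k, (12:Int), "transportation"))) ++ ([] : List (String × Int × String)) := by
  rfl

theorem pvKeywords_sorted : pvKeywords.Pairwise (fun a b => a.2.1 ≤ b.2.1) := by decide

-- ===== VERDICT =====
theorem suggest_template_for_industry_py_spec : Claim_equal_suggest_template_for_industry_py := by
  intro industry _
  unfold Spec_suggest_template_for_industry_py suggest_template_for_industry_py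
    suggest_template_for_industry_py_alt
  rw [pvBestFold_eq_first _ _ pvKeywords_sorted, pvKeywords_blocks]
  simp only [List.append_assoc, pvFirst_block, pvFirst]
  simp only [apply_ite pvOut]
  simp only [pvOut]
  set l := PySem.Str.lower industry
  cases hins : PySem.Str.isIn "insurance" l <;>
    simp only [List.any_cons, List.any_nil, hins, Bool.or_true, Bool.true_or, Bool.false_or,
      Bool.or_false, Bool.false_eq_true, if_true, if_false]
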